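-- pv_equiv track=rewrite | github.com/JeremyChim/ab-tool | tab_script.py | tab_func
-- ===== SOURCE A (Python) =====
-- def func1(tx: str) -> str:
--     """退tab"""
--     ls = tx.split('\t')
--     if ls[0] == '':
--         ls.pop(0)
--     tx2 = '\t'.join(ls)
--     return tx2
--
-- def func2(tx: str) -> str:
--     """进tab"""
--     ls = tx.split('\t')
--     ls.insert(0, '')
--     tx2 = '\t'.join(ls)
--     return tx2
--
-- def tab_func(tx: str, x) -> str:
--     """
--     :param tx: 需要做tab处理的文本
--     :param x: +是进一格tab，-是退一个tab
--     :return: 处理完成的文本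
--     """
--     ls = tx.split('\n')
--     ls2 = []
--     for i in ls:
--         match x:
--             case '-':
--                 i2 = func1(i)
--             case '+':
--                 i2 = func2(i)
--             case _:
--                 i2 = i
--         ls2.append(i2)
--
--     tx2 = '\n'.join(ls2)
--     return tx2
-- ===== SOURCE B (Python) =====
-- def tab_func(tx: str, x) -> str:
--     """Single character-level pass: no line list; dispatch on x once."""
--     if x == '+':
--         out = ['\t']
--         for c in tx:
--             out.append(c)
--             if c == '\n':
--                 out.append('\t')
--         return ''.join(out)
--     if x == '-':
--         out = []
--         at_line_start = True
--         for c in tx: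
--             if at_line_start and c == '\t':
--                 at_line_start = False
--                 continue
--             at_line_start = (c == '\n')
--             out.append(c)
--         return ''.join(out)
--     return tx
-- ===== Notes on version B (the rewrite author's own statement) =====
-- stated objective: alternative
-- what changed: A splits the text into a list of lines and runs a per-line split/pop/insert/join on tabs; B makes one character-level pass over the string (dispatching on x once), emitting a tab at each line start for '+' and skipping one line-leading tab for '-'.
import Mathlib
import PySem

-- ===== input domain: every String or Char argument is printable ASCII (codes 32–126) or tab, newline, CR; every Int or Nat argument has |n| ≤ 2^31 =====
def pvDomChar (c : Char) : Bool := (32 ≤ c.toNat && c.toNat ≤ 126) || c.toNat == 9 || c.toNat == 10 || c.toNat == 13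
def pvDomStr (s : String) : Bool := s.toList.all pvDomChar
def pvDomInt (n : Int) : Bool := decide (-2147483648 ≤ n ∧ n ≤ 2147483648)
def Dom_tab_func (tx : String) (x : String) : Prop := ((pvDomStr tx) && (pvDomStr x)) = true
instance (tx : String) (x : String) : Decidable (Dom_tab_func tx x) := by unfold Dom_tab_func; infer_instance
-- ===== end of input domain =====

-- B replaces A's split-into-lines list and per-line loop with a single character-level pass (dispatch on x hoisted out); same return value.

-- ===== PORT A =====
-- func1: ls = tx.split('\t'); if ls[0]=='': ls.pop(0); return '\t'.join(ls)   (sep ≠ '' so split is total; pop(0) on the nonempty list = tail)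
def pvFunc1 (tx : String) : String :=
  let ls := PySem.Chars.splitOn tx.toList ['\t']
  let ls := if PySem.List.pyGet? ls 0 = some [] then ls.tail else ls
  String.ofList (PySem.Chars.join ['\t'] ls)

-- func2: ls = tx.split('\t'); ls.insert(0, ''); return '\t'.join(ls)
def pvFunc2 (tx : String) : String :=
  String.ofList (PySem.Chars.join ['\t'] ([] :: PySem.Chars.splitOn tx.toList ['\t']))

def tab_func (tx : String) (x : String) : String :=
  let ls := PySem.Chars.splitOn tx.toList ['\n']      -- tx.split('\n')
  let ls2 := ls.foldl (fun ls2 i =>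
      ls2 ++ [if x = "-" then pvFunc1 (String.ofList i)
              else if x = "+" then pvFunc2 (String.ofList i)
              else String.ofList i]) []
  PySem.Str.join "\n" ls2

-- ===== PORT B =====
def tab_func_alt (tx : String) (x : String) : String :=
  if x = "+" then
    String.ofList (tx.toList.foldl (fun out c =>
      let out := out ++ [c]
      if c = '\n' then out ++ ['\t'] else out) ['\t'])
  else if x = "-" then
    String.ofList ((tx.toList.foldl (fun (s : List Char × Bool) c =>
      if s.2 && (c == '\t') then (s.1, false)
      else (s.1 ++ [c], c == '\n')) (([] : List Char), true)).1)
  else tx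

-- ===== PRECONDITION & SPEC =====
def Spec_tab_func (tx : String) (x : String) (out : String) : Prop := out = tab_func_alt tx x
instance (tx : String) (x : String) (out : String) : Decidable (Spec_tab_func tx x out) := by unfold Spec_tab_func; infer_instance

-- ===== CLAIM (what is proved, stated in full; the proofs are below) =====
def Claim_equal_tab_func : Prop := ∀ (tx : String) (x : String), Dom_tab_func tx x → Spec_tab_func tx x (tab_func tx x)

-- ===== LEMMAS AND PROOFS =====

-- simple recursive characterisation of splitting on a single character
def spChar (s : Char) : List Char → List (List Char)
  | [] => [[]]
  | c :: cs => if c = s then [] :: spChar s cs else (spChar s cs).modifyHead (c :: ·)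

theorem spChar_ne_nil (s : Char) (l : List Char) : spChar s l ≠ [] := by
  cases l with
  | nil => simp [spChar]
  | cons c cs =>
    simp only [spChar]
    split_ifs <;> simp [List.modifyHead]
    cases h : spChar s cs with
    | nil => exact absurd h (spChar_ne_nil s cs)
    | cons a t => simp

theorem splitOn_go_spec (s : Char) (fuel : Nat) (l cur : List Char) (acc : List (List Char))
    (h : l.length ≤ fuel) :
    PySem.Chars.splitOn.go [s] fuel l cur acc
      = acc.reverse ++ (spChar s l).modifyHead (cur.reverse ++ ·) := by
  induction fuel generalizing l cur acc with
  | zero =>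
    cases l with
    | nil => simp [PySem.Chars.splitOn.go, spChar, List.modifyHead]
    | cons c cs => simp at h
  | succ f ih =>
    cases l with
    | nil => simp [PySem.Chars.splitOn.go, spChar, List.modifyHead]
    | cons c cs =>
      simp only [List.length_cons, Nat.succ_le_succ_iff] at h
      by_cases hc : c = s
      · subst hc
        rw [show PySem.Chars.splitOn.go [c] (f+1) (c :: cs) cur acc
              = PySem.Chars.splitOn.go [c] f cs [] (cur.reverse :: acc) by
            simp [PySem.Chars.splitOn.go, List.isPrefixOf]]
        rw [ih cs [] (cur.reverse :: acc) h]
        simp only [spChar, List.modifyHead, List.reverse_cons]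
        cases spChar c cs <;> simp
      · have hsc : ¬ s = c := fun h' => hc h'.symm
        rw [show PySem.Chars.splitOn.go [s] (f+1) (c :: cs) cur acc
              = PySem.Chars.splitOn.go [s] f cs (c :: cur) acc by
            simp [PySem.Chars.splitOn.go, List.isPrefixOf, hsc]]
        rw [ih cs (c :: cur) acc h]
        cases hsp : spChar s cs with
        | nil => exact absurd hsp (spChar_ne_nil s cs)
        | cons a t => simp [spChar, hc, hsp, List.modifyHead]

theorem splitOn_single (s : Char) (l : List Char) :
    PySem.Chars.splitOn l [s] = spChar s l := by
  rw [PySem.Chars.splitOn, splitOn_go_spec s (l.length + 1) l [] [] (by omega)]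
  cases hsp : spChar s l with
  | nil => exact absurd hsp (spChar_ne_nil s l)
  | cons a t => simp [List.modifyHead]

theorem join_cons_head (s c : Char) (h : List Char) (t : List (List Char)) :
    PySem.Chars.join [s] ((c :: h) :: t) = c :: PySem.Chars.join [s] (h :: t) := by
  cases t with
  | nil => simp [PySem.Chars.join_singleton]
  | cons b r => simp [PySem.Chars.join_cons_cons]

theorem join_spChar (s : Char) (l : List Char) :
    PySem.Chars.join [s] (spChar s l) = l := by
  induction l with
  | nil => simp [spChar, PySem.Chars.join_singleton]
  | cons c cs ih =>
    cases hsp : spChar s cs with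
    | nil => exact absurd hsp (spChar_ne_nil s cs)
    | cons a t =>
      by_cases hc : c = s
      · subst hc
        rw [hsp] at ih
        simp [spChar, hsp, PySem.Chars.join_cons_cons, ih]
      · rw [hsp] at ih
        simp only [spChar, hc, if_false, hsp, List.modifyHead]
        rw [join_cons_head, ih]

-- per-line behaviour of func1: drop one leading tab
def dropTab : List Char → List Char
  | [] => []
  | c :: r => if c = '\t' then r else c :: r

theorem pvFunc1_char (l : List Char) :
    pvFunc1 (String.ofList l) = String.ofList (dropTab l) := by
  simp only [pvFunc1, String.toList_ofList, splitOn_single]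
  cases l with
  | nil => simp [spChar, dropTab, pysem, PySem.Chars.join_nil]
  | cons c cs =>
    cases hsp : spChar '\t' cs with
    | nil => exact absurd hsp (spChar_ne_nil _ cs)
    | cons a t =>
      by_cases hc : c = '\t'
      · subst hc
        have h1 : spChar '\t' ('\t' :: cs) = [] :: a :: t := by simp [spChar, hsp]
        rw [h1]
        have h2 : PySem.List.pyGet? (([] : List Char) :: a :: t) 0 = some [] := by simp [pysem]
        rw [h2, if_pos rfl, List.tail_cons, ← hsp, join_spChar]
        simp [dropTab]
      · have h1 : spChar '\t' (c :: cs) = (c :: a) :: t := by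
          simp [spChar, hc, hsp, List.modifyHead]
        rw [h1]
        have h2 : PySem.List.pyGet? ((c :: a) :: t) 0 = some (c :: a) := by simp [pysem]
        rw [h2, if_neg (by simp)]
        rw [join_cons_head, ← hsp, join_spChar]
        simp [dropTab, hc]

theorem pvFunc2_char (l : List Char) :
    pvFunc2 (String.ofList l) = String.ofList ('\t' :: l) := by
  simp only [pvFunc2, String.toList_ofList, splitOn_single]
  cases hsp : spChar '\t' l with
  | nil => exact absurd hsp (spChar_ne_nil _ l)
  | cons a t =>
    have hj := join_spChar '\t' l
    rw [hsp] at hj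
    rw [PySem.Chars.join_cons_cons, hj]
    rfl

-- recursive characterisations of B's two folds
def plusSpec : List Char → List Char
  | [] => []
  | c :: cs => if c = '\n' then c :: '\t' :: plusSpec cs else c :: plusSpec cs

def minusSpec : Bool → List Char → List Char
  | _, [] => []
  | b, c :: cs => if b && (c == '\t') then minusSpec false cs else c :: minusSpec (c == '\n') cs

theorem foldl_plus (cs : List Char) (acc : List Char) :
    cs.foldl (fun out c => if c = '\n' then out ++ [c] ++ ['\t'] else out ++ [c]) acc
      = acc ++ plusSpec cs := by
  induction cs generalizing acc with
  | nil => simp [plusSpec]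
  | cons c cs ih =>
    rw [List.foldl_cons]
    by_cases hc : c = '\n' <;> rw [ih] <;> simp [plusSpec, hc]

theorem foldl_minus (cs : List Char) (out : List Char) (b : Bool) :
    (cs.foldl (fun (s : List Char × Bool) c =>
      if s.2 && (c == '\t') then (s.1, false) else (s.1 ++ [c], c == '\n')) (out, b)).1
      = out ++ minusSpec b cs := by
  induction cs generalizing out b with
  | nil => simp [minusSpec]
  | cons c cs ih =>
    show (List.foldl (fun (s : List Char × Bool) c =>
        if s.2 && (c == '\t') then (s.1, false) else (s.1 ++ [c], c == '\n'))
      (if b && (c == '\t') then ((out : List Char), false) else (out ++ [c], c == '\n')) cs).1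
      = out ++ minusSpec b (c :: cs)
    by_cases h : (b && (c == '\t')) = true
    · rw [if_pos h, ih]
      simp [minusSpec, h]
    · rw [if_neg h, ih]
      simp only [minusSpec, h, Bool.false_eq_true, if_false, List.append_assoc,
        List.singleton_append]

-- main char-level lemma for '+': tabbing each line = B's '+' pass (prefixed by the initial tab)
theorem plus_join (cs : List Char) :
    (PySem.Chars.join ['\n'] ((spChar '\n' cs).map (List.cons '\t')) = '\t' :: plusSpec cs)
    ∧ (∀ h t, spChar '\n' cs = h :: t →
        PySem.Chars.join ['\n'] (h :: t.map (List.cons '\t')) = plusSpec cs) := by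
  induction cs with
  | nil =>
    refine ⟨by simp [spChar, PySem.Chars.join_singleton, plusSpec], ?_⟩
    intro h t hsp
    simp only [spChar, List.cons.injEq] at hsp
    obtain ⟨rfl, rfl⟩ := hsp
    simp [PySem.Chars.join_singleton, plusSpec]
  | cons c cs ih =>
    obtain ⟨-, ih2⟩ := ih
    cases hsp : spChar '\n' cs with
    | nil => exact absurd hsp (spChar_ne_nil _ cs)
    | cons a t =>
      by_cases hc : c = '\n'
      · subst hc
        have h1 : spChar '\n' ('\n' :: cs) = [] :: a :: t := by simp [spChar, hsp]
        constructor
        · rw [h1, List.map_cons, List.map_cons, PySem.Chars.join_cons_cons,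
            join_cons_head, ih2 a t hsp]
          simp [plusSpec]
        · intro h' t' hsp'
          rw [h1] at hsp'
          injection hsp' with e1 e2
          subst e1; subst e2
          rw [List.map_cons, PySem.Chars.join_cons_cons, join_cons_head, ih2 a t hsp]
          simp [plusSpec]
      · have h1 : spChar '\n' (c :: cs) = (c :: a) :: t := by
          simp [spChar, hc, hsp, List.modifyHead]
        constructor
        · rw [h1, List.map_cons, join_cons_head, join_cons_head, ih2 a t hsp]
          simp [plusSpec, hc]
        · intro h' t' hsp'
          rw [h1] at hsp'
          injection hsp' with e1 e2
          subst e1; subst e2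
          rw [join_cons_head, ih2 a t hsp]
          simp [plusSpec, hc]

-- main char-level lemma for '-': de-tabbing each line = B's '-' pass
theorem minus_join (cs : List Char) :
    (PySem.Chars.join ['\n'] ((spChar '\n' cs).map dropTab) = minusSpec true cs)
    ∧ (∀ h t, spChar '\n' cs = h :: t →
        PySem.Chars.join ['\n'] (h :: t.map dropTab) = minusSpec false cs) := by
  induction cs with
  | nil =>
    refine ⟨by simp [spChar, dropTab, PySem.Chars.join_singleton, minusSpec], ?_⟩
    intro h t hsp
    simp only [spChar, List.cons.injEq] at hsp
    obtain ⟨rfl, rfl⟩ := hsp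
    simp [PySem.Chars.join_singleton, minusSpec]
  | cons c cs ih =>
    obtain ⟨ih1, ih2⟩ := ih
    cases hsp : spChar '\n' cs with
    | nil => exact absurd hsp (spChar_ne_nil _ cs)
    | cons a t =>
      rw [hsp] at ih1
      by_cases hc : c = '\n'
      · subst hc
        have h1 : spChar '\n' ('\n' :: cs) = [] :: a :: t := by simp [spChar, hsp]
        constructor
        · rw [h1, List.map_cons, List.map_cons, PySem.Chars.join_cons_cons,
            ← List.map_cons, ih1]
          simp [minusSpec, dropTab]
        · intro h' t' hsp'
          rw [h1] at hsp'
          injection hsp' with e1 e2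
          subst e1; subst e2
          rw [List.map_cons, PySem.Chars.join_cons_cons, ← List.map_cons, ih1]
          simp [minusSpec]
      · have h1 : spChar '\n' (c :: cs) = (c :: a) :: t := by
          simp [spChar, hc, hsp, List.modifyHead]
        constructor
        · by_cases ht : c = '\t'
          · subst ht
            rw [h1, List.map_cons, show dropTab ('\t' :: a) = a by simp [dropTab],
              ih2 a t hsp]
            simp [minusSpec]
          · rw [h1, List.map_cons, show dropTab (c :: a) = c :: a by simp [dropTab, ht],
              join_cons_head, ih2 a t hsp]
            have hb : (c == '\n') = false := by simp [hc]
            simp [minusSpec, hb, ht]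
        · intro h' t' hsp'
          rw [h1] at hsp'
          injection hsp' with e1 e2
          subst e1; subst e2
          rw [join_cons_head, ih2 a t hsp]
          have hb : (c == '\n') = false := by simp [hc]
          simp [minusSpec, hb]

-- ===== VERDICT (by name: the statement is the Claim_ definition above) =====
theorem tab_func_spec : Claim_equal_tab_func := by
  intro tx x _
  unfold Spec_tab_func tab_func tab_func_alt
  simp only [PySem.List.foldl_append_singleton_eq_map, List.nil_append]
  by_cases hp : x = "+"
  · subst hp
    simp only [show (("+" : String) = "-") = False from by simp, if_false, if_true]
    apply String.toList_inj.mp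
    rw [PySem.Str.toList_join, String.toList_ofList, List.map_map]
    rw [show (String.toList ∘ fun i => pvFunc2 (String.ofList i)) = List.cons '\t' by
      funext i; simp [Function.comp, pvFunc2_char, String.toList_ofList]]
    rw [splitOn_single, (plus_join tx.toList).1, foldl_plus]
    simp
  · by_cases hm : x = "-"
    · subst hm
      simp only [show (("-" : String) = "+") = False from by simp, if_true, if_false]
      apply String.toList_inj.mp
      rw [PySem.Str.toList_join, String.toList_ofList, List.map_map]
      rw [show (String.toList ∘ fun i => pvFunc1 (String.ofList i)) = dropTab by
        funext i; simp [Function.comp, pvFunc1_char, String.toList_ofList]]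
      rw [splitOn_single, (minus_join tx.toList).1, foldl_minus]
      simp
    · simp only [show (x = "-") = False from by simp [hm],
        show (x = "+") = False from by simp [hp], if_false]
      apply String.toList_inj.mp
      rw [PySem.Str.toList_join, List.map_map]
      rw [show (String.toList ∘ fun i => String.ofList i) = id by
        funext i; simp [Function.comp, String.toList_ofList]]
      rw [List.map_id, splitOn_single, show ("\n" : String).toList = ['\n'] by decide,
        join_spChar]
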